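-- pv_equiv track=rewrite | github.com/waltergaldamez/cs50-AI | project2/pagerank/pagerank.py | get_pages_linking_to
-- ===== SOURCE A (Python) =====
-- def get_pages_linking_to(corpus):
--     """
--     Returns a dictionary where the keys are the pages in the corpus
--     and the values are sets of the pages linking to it.
--     If a page has no other pages linking to it, then all the pages
--     will be added to the set as linking to it
--     """
--
--     pages = dict()
--     # initialize sets
--     for page in corpus:
--         pages[page] = set()
--
--     for page in corpus:
--         linked = corpus[page]
--         for link in linked:
--             pages[link].add(page)
--
--     for page in pages:
--         # if no linking pages, add all the pages as linking pages
--         if len(pages[page]) == 0: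
--             for link in corpus:
--                 pages[page].add(link)
--
--     return pages
-- ===== SOURCE B (Python) =====
-- def get_pages_linking_to(corpus):
--     keys = list(corpus)
--     # resolve every link to the index of its target page (ValueError on unknown links)
--     adj = [[keys.index(link) for link in links] for links in corpus.values()]
--     result = {}
--     for j, page in enumerate(keys):
--         sources = {p for p, row in zip(keys, adj) if j in row}
--         result[page] = sources or set(keys)
--     return result
-- ===== Notes on version B (the rewrite author's own statement) =====
-- stated objective: alternative
-- what changed: A scatters forward links into pre-initialised mutable backlink sets keyed by page name (three dict-mutating passes); B first compiles the graph into an integer adjacency structure over the key list (each link resolved by keys.index), then computes each page's incoming set by scanning the rows for that page's index, folding the all-pages fallback into the per-page step.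
import Mathlib
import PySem

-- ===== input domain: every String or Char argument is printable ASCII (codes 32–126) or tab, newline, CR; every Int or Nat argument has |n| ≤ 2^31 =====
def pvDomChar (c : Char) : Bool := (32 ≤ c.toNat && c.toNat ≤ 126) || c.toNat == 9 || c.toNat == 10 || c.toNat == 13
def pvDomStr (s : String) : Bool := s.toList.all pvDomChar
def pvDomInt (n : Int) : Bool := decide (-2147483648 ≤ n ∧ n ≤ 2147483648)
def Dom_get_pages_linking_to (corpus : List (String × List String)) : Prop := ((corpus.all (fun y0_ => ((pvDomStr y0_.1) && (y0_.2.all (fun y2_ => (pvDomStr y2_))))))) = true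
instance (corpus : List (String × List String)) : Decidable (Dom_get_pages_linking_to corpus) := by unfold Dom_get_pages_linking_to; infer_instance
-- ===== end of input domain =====

-- B compiles the graph into an integer adjacency structure (keys.index per link) and then
-- gathers each page's incoming set by scanning the rows for that page's index, instead of
-- A's scatter of forward links into pre-initialised mutable sets (objective: alternative).

-- ===== PORT A =====
def get_pages_linking_to (corpus : List (String × List String)) : List (String × List String) :=
  -- pages = dict(); for page in corpus: pages[page] = set()
  let pages : PySem.Dict String (PySem.Set String) :=
    corpus.foldl (fun d q => d.insert q.1 PySem.Set.empty) PySem.Dict.empty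
  -- for page in corpus: linked = corpus[page]; for link in linked: pages[link].add(page)
  let pages :=
    corpus.foldl (fun d q =>
      q.2.foldl (fun d link =>
        match d.get? link with
        | some s => d.insert link (PySem.Set.add s q.1)
        | none => d  -- Python raises KeyError here; such inputs are excluded by Pre_
        ) d) pages
  -- for page in pages: if len(pages[page]) == 0: for link in corpus: pages[page].add(link)
  let pages :=
    pages.keys.foldl (fun d page =>
      match d.get? page with
      | some s =>
        if s.length = 0 then
          corpus.foldl (fun d q =>
            match d.get? page with
            | some s => d.insert page (PySem.Set.add s q.1)
            | none => d) d
        else d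
      | none => d  -- unreachable: page is iterated from the dict's own keys
      ) pages
  pages.items

-- ===== PORT B =====
def get_pages_linking_to_alt (corpus : List (String × List String)) : List (String × List String) :=
  -- keys = list(corpus)
  let keys : List String := corpus.map Prod.fst
  -- adj = [[keys.index(link) for link in links] for links in corpus.values()]
  let adj : List (List Int) := corpus.map (fun q => q.2.map (fun link =>
    match PySem.List.index? keys link with
    | some i => (i : Int)
    | none => 0))  -- Python raises ValueError here; such inputs are excluded by Pre_
  -- result = {}
  -- for j, page in enumerate(keys):
  --     sources = {p for p, row in zip(keys, adj) if j in row}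
  --     result[page] = sources or set(keys)
  -- return result
  ((PySem.List.enumerate keys).foldl (fun d jp =>
    let sources : PySem.Set String :=
      PySem.Set.ofList (((keys.zip adj).filter (fun pr => decide (jp.1 ∈ pr.2))).map Prod.fst)
    d.insert jp.2 (if sources = [] then PySem.Set.ofList keys else sources)) PySem.Dict.empty).items

-- ===== PRECONDITION & SPEC =====
-- Pre_ excludes corpora whose key lists repeat a key (a Python dict cannot; the assoc-list
-- behaviour would be accidental) and corpora with a link to a page that is not a corpus key
-- (there A raises KeyError on pages[link]).
def Pre_get_pages_linking_to (corpus : List (String × List String)) : Prop :=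
  (corpus.map Prod.fst).Nodup ∧ ∀ q ∈ corpus, ∀ l ∈ q.2, l ∈ corpus.map Prod.fst
instance (corpus : List (String × List String)) : Decidable (Pre_get_pages_linking_to corpus) := by
  unfold Pre_get_pages_linking_to; infer_instance
def pvWitness_get_pages_linking_to : (List (String × List String)) :=
  [("a", ["b", "b"]), ("b", []), ("c", ["a", "b"])]

def Spec_get_pages_linking_to (corpus : List (String × List String)) (out : List (String × List String)) : Prop := out = get_pages_linking_to_alt corpus
instance (corpus : List (String × List String)) (out : List (String × List String)) : Decidable (Spec_get_pages_linking_to corpus out) := by unfold Spec_get_pages_linking_to; infer_instance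

-- ===== CLAIM (what is proved, stated in full; the proofs are below) =====
def Claim_equal_get_pages_linking_to : Prop := ∀ (corpus : List (String × List String)), Dom_get_pages_linking_to corpus → Pre_get_pages_linking_to corpus → Spec_get_pages_linking_to corpus (get_pages_linking_to corpus)

-- ===== LEMMAS AND PROOFS =====

def pvIncs (ps : List (String × List String)) (x : String) : List String :=
  (ps.filter (fun r => x ∈ r.2)).map Prod.fst

def pvPhase1 (corpus : List (String × List String)) : PySem.Dict String (PySem.Set String) :=
  corpus.foldl (fun d q => d.insert q.1 PySem.Set.empty) PySem.Dict.empty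

def pvStep2 (p : String) (d : PySem.Dict String (PySem.Set String)) (link : String) :
    PySem.Dict String (PySem.Set String) :=
  match d.get? link with
  | some s => d.insert link (PySem.Set.add s p)
  | none => d

def pvPhase2 (ps : List (String × List String)) (d : PySem.Dict String (PySem.Set String)) :
    PySem.Dict String (PySem.Set String) :=
  ps.foldl (fun d q => q.2.foldl (pvStep2 q.1) d) d

def pvStep3i (corpus : List (String × List String)) (page : String)
    (d : PySem.Dict String (PySem.Set String)) : PySem.Dict String (PySem.Set String) :=
  corpus.foldl (fun d q =>
    match d.get? page with
    | some s => d.insert page (PySem.Set.add s q.1)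
    | none => d) d

def pvPhase3 (corpus : List (String × List String)) (K : List String)
    (d : PySem.Dict String (PySem.Set String)) : PySem.Dict String (PySem.Set String) :=
  K.foldl (fun d page =>
    match d.get? page with
    | some s => if s.length = 0 then pvStep3i corpus page d else d
    | none => d) d

theorem isSome_get?_iff_mem_keys (d : PySem.Dict String (PySem.Set String)) (k : String) :
    (d.get? k).isSome ↔ k ∈ d.keys := by
  rw [Option.isSome_iff_ne_none, ne_eq, PySem.Dict.get?_eq_none_iff_not_mem_keys, not_not]

theorem keys_pvStep2 (p : String) (d : PySem.Dict String (PySem.Set String)) (link : String) :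
    (pvStep2 p d link).keys = d.keys := by
  unfold pvStep2
  cases h : d.get? link with
  | none => rfl
  | some s =>
      exact PySem.Dict.keys_insert_of_contains d _
        (by rw [PySem.Dict.contains_eq_isSome_get?, h]; rfl)

theorem keys_foldl_of_preserve {α : Type} (step : PySem.Dict String (PySem.Set String) → α → PySem.Dict String (PySem.Set String))
    (h : ∀ d x, (step d x).keys = d.keys) :
    ∀ (l : List α) (d : PySem.Dict String (PySem.Set String)), (l.foldl step d).keys = d.keys := by
  intro l
  induction l with
  | nil => intro d; rfl
  | cons x xs ih => intro d; rw [List.foldl_cons, ih, h]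

theorem keys_pvPhase2 (ps : List (String × List String)) (d : PySem.Dict String (PySem.Set String)) :
    (pvPhase2 ps d).keys = d.keys := by
  unfold pvPhase2
  exact keys_foldl_of_preserve _ (fun d q => keys_foldl_of_preserve _ (keys_pvStep2 q.1) q.2 d) ps d

theorem keys_pvStep3i (corpus : List (String × List String)) (page : String)
    (d : PySem.Dict String (PySem.Set String)) : (pvStep3i corpus page d).keys = d.keys := by
  refine keys_foldl_of_preserve _ (fun d q => ?_) corpus d
  cases h : d.get? page with
  | none => simp
  | some s =>
      exact PySem.Dict.keys_insert_of_contains d _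
        (by rw [PySem.Dict.contains_eq_isSome_get?, h]; rfl)

theorem keys_pvPhase3 (corpus : List (String × List String)) (K : List String)
    (d : PySem.Dict String (PySem.Set String)) : (pvPhase3 corpus K d).keys = d.keys := by
  refine keys_foldl_of_preserve _ (fun d page => ?_) K d
  cases h : d.get? page with
  | none => simp
  | some s =>
      show (if s.length = 0 then pvStep3i corpus page d else d).keys = d.keys
      split
      · exact keys_pvStep3i corpus page d
      · rfl

theorem getD_pvPhase1 (l : List (String × List String)) :
    ∀ (d : PySem.Dict String (PySem.Set String)) (k : String),
      ((l.foldl (fun d q => d.insert q.1 PySem.Set.empty) d).getD k []) =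
        if k ∈ l.map Prod.fst then [] else d.getD k [] := by
  induction l with
  | nil => intro d k; simp
  | cons q rest ih =>
      intro d k
      rw [List.foldl_cons, ih, PySem.Dict.getD_insert]
      by_cases hm : k ∈ rest.map Prod.fst <;> by_cases he : k = q.1 <;>
        simp [hm, he, PySem.Set.empty]

theorem getD_inner2 (p : String) (ls : List String) :
    ∀ (d : PySem.Dict String (PySem.Set String)) (k : String),
      (∀ l ∈ ls, (d.get? l).isSome) →
      ((ls.foldl (pvStep2 p) d).getD k []) =
        if k ∈ ls then PySem.Set.add (d.getD k []) p else d.getD k [] := by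
  induction ls with
  | nil => intro d k _; simp
  | cons l0 rest ih =>
      intro d k hs
      obtain ⟨s, hs0⟩ := Option.isSome_iff_exists.mp (hs l0 (by simp))
      have hstep : pvStep2 p d l0 = d.insert l0 (PySem.Set.add s p) := by
        unfold pvStep2; rw [hs0]
      rw [List.foldl_cons, hstep, ih]
      · have hd0 : d.getD l0 [] = s := PySem.Dict.getD_of_get?_eq_some d [] hs0
        by_cases hm : k ∈ rest <;> by_cases he : k = l0 <;>
          simp_all [PySem.Dict.getD_insert, PySem.Set.add_of_mem, PySem.Set.mem_add]
      · intro l hl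
        rw [PySem.Dict.get?_insert]
        split
        · rfl
        · exact hs l (by simp [hl])

theorem getD_pvPhase2 (ps : List (String × List String)) :
    ∀ (d : PySem.Dict String (PySem.Set String)) (k : String),
      (∀ q ∈ ps, ∀ l ∈ q.2, l ∈ d.keys) →
      ((pvPhase2 ps d).getD k []) =
        ps.foldl (fun acc q => if k ∈ q.2 then PySem.Set.add acc q.1 else acc) (d.getD k []) := by
  induction ps with
  | nil => intro d k _; rfl
  | cons q rest ih =>
      intro d k hkeys
      have hkq : ∀ l ∈ q.2, (d.get? l).isSome := fun l hl =>
        (isSome_get?_iff_mem_keys d l).mpr (hkeys q (by simp) l hl)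
      have hk2 : (q.2.foldl (pvStep2 q.1) d).keys = d.keys :=
        keys_foldl_of_preserve _ (keys_pvStep2 q.1) q.2 d
      unfold pvPhase2
      rw [List.foldl_cons, List.foldl_cons]
      rw [show (rest.foldl (fun d q => q.2.foldl (pvStep2 q.1) d) (q.2.foldl (pvStep2 q.1) d)) =
            pvPhase2 rest (q.2.foldl (pvStep2 q.1) d) from rfl]
      rw [ih _ k (by intro q' hq' l hl; rw [hk2]; exact hkeys q' (by simp [hq']) l hl)]
      rw [getD_inner2 q.1 q.2 d k hkq]

theorem scalar2 (k : String) (ps : List (String × List String)) :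
    ∀ (acc : PySem.Set String), (ps.map Prod.fst).Nodup → (∀ q ∈ ps, q.1 ∉ acc) →
      ps.foldl (fun acc q => if k ∈ q.2 then PySem.Set.add acc q.1 else acc) acc =
        acc ++ pvIncs ps k := by
  induction ps with
  | nil => intro acc _ _; simp [pvIncs]
  | cons q rest ih =>
      intro acc hnd hni
      have hnd2 := List.nodup_cons.mp (show (q.1 :: rest.map Prod.fst).Nodup by simpa using hnd)
      rw [List.foldl_cons]
      by_cases hm : k ∈ q.2
      · rw [if_pos hm, PySem.Set.add_of_not_mem (hni q (by simp)), ih]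
        · simp [pvIncs, hm]
        · exact hnd2.2
        · intro q' hq'
          simp only [List.mem_append]
          rintro (h | h)
          · exact hni q' (by simp [hq']) h
          · have : q'.1 ≠ q.1 :=
              fun he => hnd2.1 (he ▸ List.mem_map_of_mem hq')
            simp_all
      · rw [if_neg hm, ih]
        · simp [pvIncs, hm]
        · exact hnd2.2
        · exact fun q' hq' => hni q' (by simp [hq'])

theorem getD_pvStep3i (page : String) :
    ∀ (cs : List (String × List String)) (d : PySem.Dict String (PySem.Set String)) (s : PySem.Set String) (k : String),
      d.get? page = some s →
      ((pvStep3i cs page d).getD k []) =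
        if k = page then cs.foldl (fun s q => PySem.Set.add s q.1) s else d.getD k [] := by
  intro cs
  induction cs with
  | nil =>
      intro d s k hs
      by_cases he : k = page <;> simp [pvStep3i, he, PySem.Dict.getD_of_get?_eq_some d [] hs]
  | cons q rest ih =>
      intro d s k hs
      unfold pvStep3i
      rw [List.foldl_cons]
      have hstep : (match d.get? page with
          | some s => d.insert page (PySem.Set.add s q.1)
          | none => d) = d.insert page (PySem.Set.add s q.1) := by rw [hs]
      rw [hstep]
      rw [show (rest.foldl (fun d q =>
            match d.get? page with
            | some s => d.insert page (PySem.Set.add s q.1)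
            | none => d) (d.insert page (PySem.Set.add s q.1))) =
          pvStep3i rest page (d.insert page (PySem.Set.add s q.1)) from rfl]
      rw [ih _ (PySem.Set.add s q.1) k (by rw [PySem.Dict.get?_insert]; simp)]
      by_cases he : k = page <;> simp [he, PySem.Dict.getD_insert]

theorem getD_pvPhase3 (corpus : List (String × List String)) (K : List String) :
    ∀ (d : PySem.Dict String (PySem.Set String)) (k : String), K.Nodup →
      (∀ p ∈ K, p ∈ d.keys) →
      ((pvPhase3 corpus K d).getD k []) =
        if k ∈ K then
          (if (d.getD k []).length = 0 then
            corpus.foldl (fun s q => PySem.Set.add s q.1) (d.getD k []) else d.getD k [])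
        else d.getD k [] := by
  induction K with
  | nil => intro d k _ _; simp [pvPhase3]
  | cons p rest ih =>
      intro d k hnd hmem
      obtain ⟨s, hs⟩ := Option.isSome_iff_exists.mp
        ((isSome_get?_iff_mem_keys d p).mpr (hmem p (by simp)))
      have hds : d.getD p [] = s := PySem.Dict.getD_of_get?_eq_some d [] hs
      have hd'eq : ∀ (d' : PySem.Dict String (PySem.Set String)),
          d'.keys = d.keys →
          (∀ j, d'.getD j [] = if j = p then
              (if (d.getD p []).length = 0 then
                corpus.foldl (fun s q => PySem.Set.add s q.1) (d.getD p []) else d.getD p [])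
            else d.getD j []) →
          ((pvPhase3 corpus rest d').getD k []) =
            if k ∈ p :: rest then
              (if (d.getD k []).length = 0 then
                corpus.foldl (fun s q => PySem.Set.add s q.1) (d.getD k []) else d.getD k [])
            else d.getD k [] := by
        intro d' hkeys' hgetD'
        have hnd' := List.nodup_cons.mp hnd
        rw [ih d' k hnd'.2 (fun j hj => hkeys' ▸ hmem j (by simp [hj]))]
        by_cases hr : k ∈ rest
        · have hkp : k ≠ p := fun he => hnd'.1 (he ▸ hr)
          simp [hr, hgetD' k, hkp]
        · by_cases hkp : k = p
          · subst hkp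
            simp [hr, hgetD' k]
          · simp [hr, hkp, hgetD' k]
      have hmatch : (match d.get? p with
          | some s => if s.length = 0 then pvStep3i corpus p d else d
          | none => d) = (if s.length = 0 then pvStep3i corpus p d else d) := by rw [hs]
      unfold pvPhase3
      rw [List.foldl_cons]
      show ((pvPhase3 corpus rest (match d.get? p with
          | some s => if s.length = 0 then pvStep3i corpus p d else d
          | none => d)).getD k []) = _
      refine hd'eq _ ?_ ?_
      · rw [hmatch]
        split
        · exact keys_pvStep3i corpus p d
        · rfl
      · intro j
        rw [hmatch]
        by_cases hlen : s.length = 0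
        · rw [if_pos hlen, getD_pvStep3i p corpus d s j hs]
          simp [hds, hlen]
        · rw [if_neg hlen]
          by_cases hj : j = p <;> simp [hj, hds, hlen]

theorem keys_pvPhase1 (corpus : List (String × List String)) :
    (pvPhase1 corpus).keys = PySem.Set.ofList (corpus.map Prod.fst) := by
  unfold pvPhase1
  rw [PySem.Dict.keys_foldl_insert_key corpus Prod.fst (fun _ _ => PySem.Set.empty) PySem.Dict.empty,
    PySem.Dict.keys_empty, PySem.Set.ofList_eq_foldl]
  rfl

theorem pvFoldl_add_eq_ofList (corpus : List (String × List String)) :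
    corpus.foldl (fun s q => PySem.Set.add s q.1) [] = PySem.Set.ofList (corpus.map Prod.fst) := by
  rw [PySem.Set.ofList_eq_foldl, List.foldl_map]

-- A's result, closed form: for each key k in corpus order, its backlink set is pvIncs
-- (sources in corpus order), or all keys when that is empty.
theorem pvA_closed (corpus : List (String × List String))
    (hnd : (corpus.map Prod.fst).Nodup)
    (hlinks : ∀ q ∈ corpus, ∀ l ∈ q.2, l ∈ corpus.map Prod.fst) :
    get_pages_linking_to corpus =
      (corpus.map Prod.fst).map (fun k =>
        (k, if pvIncs corpus k = [] then PySem.Set.ofList (corpus.map Prod.fst)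
            else pvIncs corpus k)) := by
  have hk1 : (pvPhase1 corpus).keys = corpus.map Prod.fst := by
    rw [keys_pvPhase1, PySem.Set.ofList_eq_self_of_nodup _ hnd]
  have hk2 : (pvPhase2 corpus (pvPhase1 corpus)).keys = corpus.map Prod.fst := by
    rw [keys_pvPhase2, hk1]
  have hg1 : ∀ k, (pvPhase1 corpus).getD k [] = [] := by
    intro k
    unfold pvPhase1
    rw [getD_pvPhase1]
    split
    · rfl
    · exact PySem.Dict.getD_empty k []
  have hg2 : ∀ k, (pvPhase2 corpus (pvPhase1 corpus)).getD k [] = pvIncs corpus k := by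
    intro k
    rw [getD_pvPhase2 corpus _ k (by intro q hq l hl; rw [hk1]; exact hlinks q hq l hl),
      hg1 k, scalar2 k corpus [] hnd (by simp)]
    simp
  have hk3 : (pvPhase3 corpus (corpus.map Prod.fst) (pvPhase2 corpus (pvPhase1 corpus))).keys = corpus.map Prod.fst := by
    rw [keys_pvPhase3, hk2]
  have hA : get_pages_linking_to corpus =
      (pvPhase3 corpus (pvPhase2 corpus (pvPhase1 corpus)).keys
        (pvPhase2 corpus (pvPhase1 corpus))).items := rfl
  rw [hA, hk2]
  rw [PySem.Dict.items_eq_map_keys _ (by rw [hk3]; exact hnd) [], hk3]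
  refine List.map_congr_left (fun k hk => ?_)
  rw [getD_pvPhase3 corpus (corpus.map Prod.fst) _ k hnd (fun p hp => hk2 ▸ hp), hg2 k,
    if_pos hk]
  by_cases hinc : pvIncs corpus k = []
  · rw [if_pos (by simp [hinc]), hinc, pvFoldl_add_eq_ofList]
    simp
  · rw [if_neg (by simpa [List.length_eq_zero_iff] using hinc), if_neg hinc]

-- B-side: a dict built by one insert per distinct key, read back
theorem getD_bbuild_notmem {a : Type} (keyf : a -> String) (val : a -> PySem.Set String) :
    ∀ (l : List a) (d : PySem.Dict String (PySem.Set String)) (k : String),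
      k ∉ l.map keyf ->
      ((l.foldl (fun d r => d.insert (keyf r) (val r)) d).getD k []) = d.getD k [] := by
  intro l
  induction l with
  | nil => intro d k _; rfl
  | cons r rest ih =>
      intro d k hk
      rw [List.foldl_cons, ih _ k (fun h => hk (by simp [h])), PySem.Dict.getD_insert,
        if_neg (fun h => hk (by simp [h]))]

theorem getD_bbuild {a : Type} (keyf : a -> String) (val : a -> PySem.Set String) :
    ∀ (l : List a) (d : PySem.Dict String (PySem.Set String)) (q : a),
      q ∈ l -> (l.map keyf).Nodup ->
      ((l.foldl (fun d r => d.insert (keyf r) (val r)) d).getD (keyf q) []) = val q := by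
  intro l
  induction l with
  | nil => intro d q hq _; simp at hq
  | cons r rest ih =>
      intro d q hq hnd
      have hnd2 := List.nodup_cons.mp (show (keyf r :: rest.map keyf).Nodup by simpa using hnd)
      rw [List.foldl_cons]
      rcases List.mem_cons.mp hq with h | h
      · subst h
        rw [getD_bbuild_notmem keyf val rest _ (keyf q) hnd2.1, PySem.Dict.getD_insert_self]
      · exact ih _ q h hnd2.2

theorem keys_bbuild {a : Type} (keyf : a -> String) (val : a -> PySem.Set String)
    (l : List a) (hnd : (l.map keyf).Nodup) :
    (l.foldl (fun d r => d.insert (keyf r) (val r)) PySem.Dict.empty).keys = l.map keyf := by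
  rw [PySem.Dict.keys_foldl_insert_key l keyf (fun d r => val r) PySem.Dict.empty,
    PySem.Dict.keys_empty, PySem.Set.update_nil_left, PySem.Set.ofList_eq_self_of_nodup _ hnd]

theorem pvIncs_nodup (corpus : List (String × List String))
    (hnd : (corpus.map Prod.fst).Nodup) (k : String) : (pvIncs corpus k).Nodup :=
  (List.Sublist.map Prod.fst List.filter_sublist).nodup hnd

-- B's per-row index membership test decodes back to string membership
theorem pvRow_mem (corpus : List (String × List String))
    (hnd : (corpus.map Prod.fst).Nodup) (q : String × List String)
    (hq : ∀ l ∈ q.2, l ∈ corpus.map Prod.fst)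
    (jn : Nat) (hjn : jn < (corpus.map Prod.fst).length) :
    ((jn : Int) ∈ q.2.map (fun link =>
        match PySem.List.index? (corpus.map Prod.fst) link with
        | some i => (i : Int)
        | none => 0)) ↔ (corpus.map Prod.fst)[jn] ∈ q.2 := by
  rw [List.mem_map]
  constructor
  · rintro ⟨l, hl, hidx⟩
    obtain ⟨m, hm⟩ := Option.isSome_iff_exists.mp
      ((PySem.List.index?_isSome_iff _ _).mpr (hq l hl))
    rw [hm] at hidx
    have hidx2 : (m : Int) = (jn : Int) := by simpa using hidx
    have hmjn : m = jn := by exact_mod_cast hidx2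
    obtain ⟨hmlt, hget, -⟩ := PySem.List.getElem_of_index?_eq_some hm
    subst hmjn
    rwa [hget]
  · intro hmem
    obtain ⟨m, hm⟩ := Option.isSome_iff_exists.mp
      ((PySem.List.index?_isSome_iff _ _).mpr (hq _ hmem))
    obtain ⟨hmlt, hget, -⟩ := PySem.List.getElem_of_index?_eq_some hm
    have hmjn : m = jn := by
      have := List.Nodup.getElem_inj_iff hnd (hi := hmlt) (hj := hjn)
      exact this.mp hget
    refine ⟨(corpus.map Prod.fst)[jn], hmem, ?_⟩
    rw [hm, hmjn]

theorem pvSources_eq (corpus : List (String × List String))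
    (hnd : (corpus.map Prod.fst).Nodup)
    (hlinks : ∀ q ∈ corpus, ∀ l ∈ q.2, l ∈ corpus.map Prod.fst)
    (jn : Nat) (hjn : jn < (corpus.map Prod.fst).length) :
    (((corpus.map Prod.fst).zip (corpus.map (fun q => q.2.map (fun link =>
        match PySem.List.index? (corpus.map Prod.fst) link with
        | some i => (i : Int)
        | none => 0)))).filter (fun pr => decide ((jn : Int) ∈ pr.2))).map Prod.fst =
      pvIncs corpus ((corpus.map Prod.fst)[jn]) := by
  rw [List.zip_map', List.filter_map, List.map_map]
  have : ∀ x ∈ corpus,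
      (decide ((jn : Int) ∈ x.2.map (fun link =>
        match PySem.List.index? (corpus.map Prod.fst) link with
        | some i => (i : Int)
        | none => 0))) = decide ((corpus.map Prod.fst)[jn] ∈ x.2) := by
    intro x hx
    exact decide_eq_decide.mpr (pvRow_mem corpus hnd x (hlinks x hx) jn hjn)
  simp only [Function.comp_def]
  rw [List.filter_congr this]
  simp [pvIncs]

-- B's per-position value, named for the proofs (the port's loop body zeta-reduces to it)
def pvBval (corpus : List (String × List String)) (jp : Int × String) : PySem.Set String :=
  if PySem.Set.ofList ((((corpus.map Prod.fst).zip (corpus.map (fun q => q.2.map (fun link =>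
        match PySem.List.index? (corpus.map Prod.fst) link with
        | some i => (i : Int)
        | none => 0)))).filter (fun pr => decide (jp.1 ∈ pr.2))).map Prod.fst) = []
  then PySem.Set.ofList (corpus.map Prod.fst)
  else PySem.Set.ofList ((((corpus.map Prod.fst).zip (corpus.map (fun q => q.2.map (fun link =>
        match PySem.List.index? (corpus.map Prod.fst) link with
        | some i => (i : Int)
        | none => 0)))).filter (fun pr => decide (jp.1 ∈ pr.2))).map Prod.fst)

theorem pvBval_eq (corpus : List (String × List String))
    (hnd : (corpus.map Prod.fst).Nodup)
    (hlinks : ∀ q ∈ corpus, ∀ l ∈ q.2, l ∈ corpus.map Prod.fst)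
    (jn : Nat) (hjn : jn < (corpus.map Prod.fst).length) (k : String)
    (hget : (corpus.map Prod.fst)[jn] = k) :
    pvBval corpus ((0 : Int) + (jn : Int), k) =
      (if pvIncs corpus k = [] then PySem.Set.ofList (corpus.map Prod.fst)
        else pvIncs corpus k) := by
  unfold pvBval
  simp only [zero_add]
  rw [pvSources_eq corpus hnd hlinks jn hjn, hget,
    PySem.Set.ofList_eq_self_of_nodup _ (pvIncs_nodup corpus hnd k)]

theorem pvB_closed (corpus : List (String × List String))
    (hnd : (corpus.map Prod.fst).Nodup)
    (hlinks : ∀ q ∈ corpus, ∀ l ∈ q.2, l ∈ corpus.map Prod.fst) :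
    get_pages_linking_to_alt corpus =
      (corpus.map Prod.fst).map (fun k =>
        (k, if pvIncs corpus k = [] then PySem.Set.ofList (corpus.map Prod.fst)
            else pvIncs corpus k)) := by
  have hB : get_pages_linking_to_alt corpus =
      ((PySem.List.enumerate (corpus.map Prod.fst)).foldl
        (fun d jp => d.insert jp.2 (pvBval corpus jp)) PySem.Dict.empty).items := rfl
  have hknd : ((PySem.List.enumerate (corpus.map Prod.fst)).map Prod.snd).Nodup := by
    rw [PySem.List.map_snd_enumerate]; exact hnd
  rw [hB, PySem.Dict.items_eq_map_keys _
      (by rw [keys_bbuild Prod.snd (pvBval corpus) _ hknd, PySem.List.map_snd_enumerate]; exact hnd) [],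
    keys_bbuild Prod.snd (pvBval corpus) _ hknd, PySem.List.map_snd_enumerate]
  refine List.map_congr_left (fun k hk => ?_)
  obtain ⟨jn, hjn, hget⟩ := List.mem_iff_getElem.mp hk
  have hqmem : ((0 : Int) + (jn : Int), (corpus.map Prod.fst)[jn]) ∈
      PySem.List.enumerate (corpus.map Prod.fst) :=
    (PySem.List.mem_enumerate_iff _ _ _).mpr ⟨jn, hjn, rfl⟩
  have hgd := getD_bbuild Prod.snd (pvBval corpus)
    (PySem.List.enumerate (corpus.map Prod.fst)) PySem.Dict.empty _ hqmem hknd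
  rw [hget] at hgd
  rw [hgd, pvBval_eq corpus hnd hlinks jn hjn k hget]

-- ===== VERDICT (by name: the statement is the Claim_ definition above) =====
theorem get_pages_linking_to_spec : Claim_equal_get_pages_linking_to := by
  intro corpus _ hpre
  unfold Spec_get_pages_linking_to
  rw [pvA_closed corpus hpre.1 hpre.2, pvB_closed corpus hpre.1 hpre.2]
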